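-- pv_equiv track=rewrite | github.com/Fluxy05/logs-automation-python | main.py | comptage_user_agent
-- ===== SOURCE A (Python) =====
-- def comptage_user_agent(useragent_input):
--     result = []
--     opera_win = 0
--     opera_lin = 0
--     firefox_win = 0
--     firefox_lin = 0
--     firefox_android = 0
--     firefox_apple = 0
--     other = 0
--     for i in range(len(useragent_input)):
--         if useragent_input[i] == '"Mozilla/5.0(X11;' :
--             firefox_lin = firefox_lin + 1
--         elif useragent_input[i] == '"Mozilla/5.0(Android' :
--             firefox_android = firefox_android + 1
--         elif useragent_input[i] == '"Mozilla/5.0(compatible;' or useragent_input[i] == '"Mozilla/5.0(Windows;' :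
--             firefox_win = firefox_win + 1
--         elif useragent_input[i] == '"Mozilla/5.0(Macintosh;' :
--             firefox_apple = firefox_apple + 1
--         elif useragent_input[i] == '"Opera/8.28.(X11;Linux' :
--             opera_lin = opera_lin + 1
--         elif useragent_input[i] == '"Opera/9.37.(WindowsNT' :
--             opera_win = opera_win + 1
--         else :
--             other = other + 1
--     result.append(opera_win)
--     result.append(opera_lin)
--     result.append(firefox_win)
--     result.append(firefox_lin)
--     result.append(firefox_android)
--     result.append(firefox_apple)
--     result.append(other)
--     return(result)
-- ===== SOURCE B (Python) =====
-- def comptage_user_agent(useragent_input):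
--     c = useragent_input.count
--     opera_win = c('"Opera/9.37.(WindowsNT')
--     opera_lin = c('"Opera/8.28.(X11;Linux')
--     firefox_win = c('"Mozilla/5.0(compatible;') + c('"Mozilla/5.0(Windows;')
--     firefox_lin = c('"Mozilla/5.0(X11;')
--     firefox_android = c('"Mozilla/5.0(Android')
--     firefox_apple = c('"Mozilla/5.0(Macintosh;')
--     other = len(useragent_input) - (opera_win + opera_lin + firefox_win
--                                     + firefox_lin + firefox_android + firefox_apple)
--     return [opera_win, opera_lin, firefox_win, firefox_lin,
--             firefox_android, firefox_apple, other]
-- ===== Notes on version B (the rewrite author's own statement) =====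
-- stated objective: simpler
-- what changed: Replaces the indexed loop with a six-branch if/elif chain over seven mutable counters by per-category list.count queries plus 'other' computed as len minus the sum of the six category totals.
import Mathlib
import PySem

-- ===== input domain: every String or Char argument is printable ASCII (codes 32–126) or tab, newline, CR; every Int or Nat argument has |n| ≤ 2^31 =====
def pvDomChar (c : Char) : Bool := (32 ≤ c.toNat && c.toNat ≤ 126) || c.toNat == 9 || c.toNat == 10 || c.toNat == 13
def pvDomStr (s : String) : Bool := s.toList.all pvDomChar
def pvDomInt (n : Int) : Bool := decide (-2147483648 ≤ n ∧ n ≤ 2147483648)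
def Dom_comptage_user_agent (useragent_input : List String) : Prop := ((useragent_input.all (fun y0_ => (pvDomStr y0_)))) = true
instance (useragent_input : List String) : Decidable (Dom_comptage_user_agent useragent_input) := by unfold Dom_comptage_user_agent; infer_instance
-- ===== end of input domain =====

-- B replaces A's indexed loop with its if/elif chain over seven counters by per-category
-- list.count queries plus 'other' = len minus the six category totals (objective: simpler).

-- ===== PORT A =====
-- the for-loop over useragent_input with the seven counters, branches in A's order
def comptage_loop (l : List String)
    (opera_win opera_lin firefox_win firefox_lin firefox_android firefox_apple other : Int) :
    List Int :=
  match l with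
  | [] =>
      [opera_win, opera_lin, firefox_win, firefox_lin, firefox_android, firefox_apple, other]
  | x :: xs =>
      if x == "\"Mozilla/5.0(X11;" then
        comptage_loop xs opera_win opera_lin firefox_win (firefox_lin + 1) firefox_android firefox_apple other
      else if x == "\"Mozilla/5.0(Android" then
        comptage_loop xs opera_win opera_lin firefox_win firefox_lin (firefox_android + 1) firefox_apple other
      else if x == "\"Mozilla/5.0(compatible;" || x == "\"Mozilla/5.0(Windows;" then
        comptage_loop xs opera_win opera_lin (firefox_win + 1) firefox_lin firefox_android firefox_apple other
      else if x == "\"Mozilla/5.0(Macintosh;" then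
        comptage_loop xs opera_win opera_lin firefox_win firefox_lin firefox_android (firefox_apple + 1) other
      else if x == "\"Opera/8.28.(X11;Linux" then
        comptage_loop xs opera_win (opera_lin + 1) firefox_win firefox_lin firefox_android firefox_apple other
      else if x == "\"Opera/9.37.(WindowsNT" then
        comptage_loop xs (opera_win + 1) opera_lin firefox_win firefox_lin firefox_android firefox_apple other
      else
        comptage_loop xs opera_win opera_lin firefox_win firefox_lin firefox_android firefox_apple (other + 1)

def comptage_user_agent (useragent_input : List String) : List Int :=
  comptage_loop useragent_input 0 0 0 0 0 0 0

-- ===== PORT B =====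
def comptage_user_agent_alt (useragent_input : List String) : List Int :=
  let opera_win : Int := PySem.List.count useragent_input "\"Opera/9.37.(WindowsNT"
  let opera_lin : Int := PySem.List.count useragent_input "\"Opera/8.28.(X11;Linux"
  let firefox_win : Int := PySem.List.count useragent_input "\"Mozilla/5.0(compatible;"
      + PySem.List.count useragent_input "\"Mozilla/5.0(Windows;"
  let firefox_lin : Int := PySem.List.count useragent_input "\"Mozilla/5.0(X11;"
  let firefox_android : Int := PySem.List.count useragent_input "\"Mozilla/5.0(Android"
  let firefox_apple : Int := PySem.List.count useragent_input "\"Mozilla/5.0(Macintosh;"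
  let other : Int := (useragent_input.length : Int)
      - (opera_win + opera_lin + firefox_win + firefox_lin + firefox_android + firefox_apple)
  [opera_win, opera_lin, firefox_win, firefox_lin, firefox_android, firefox_apple, other]

-- ===== PRECONDITION & SPEC =====
def Spec_comptage_user_agent (useragent_input : List String) (out : List Int) : Prop := out = comptage_user_agent_alt useragent_input
instance (useragent_input : List String) (out : List Int) : Decidable (Spec_comptage_user_agent useragent_input out) := by unfold Spec_comptage_user_agent; infer_instance

-- ===== CLAIM (what is proved, stated in full; the proofs are below) =====
def Claim_equal_comptage_user_agent : Prop := ∀ (useragent_input : List String), Dom_comptage_user_agent useragent_input → Spec_comptage_user_agent useragent_input (comptage_user_agent useragent_input)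

-- ===== LEMMAS AND PROOFS =====
theorem comptage_loop_eq (l : List String)
    (ow ol fw fl fa fap ot : Int) :
    comptage_loop l ow ol fw fl fa fap ot =
      [ow + l.count "\"Opera/9.37.(WindowsNT",
       ol + l.count "\"Opera/8.28.(X11;Linux",
       fw + l.count "\"Mozilla/5.0(compatible;" + l.count "\"Mozilla/5.0(Windows;",
       fl + l.count "\"Mozilla/5.0(X11;",
       fa + l.count "\"Mozilla/5.0(Android",
       fap + l.count "\"Mozilla/5.0(Macintosh;",
       ot + ((l.length : Int)
         - (l.count "\"Opera/9.37.(WindowsNT" + l.count "\"Opera/8.28.(X11;Linux"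
            + (l.count "\"Mozilla/5.0(compatible;" + l.count "\"Mozilla/5.0(Windows;")
            + l.count "\"Mozilla/5.0(X11;" + l.count "\"Mozilla/5.0(Android"
            + l.count "\"Mozilla/5.0(Macintosh;"))] := by
  induction l generalizing ow ol fw fl fa fap ot with
  | nil => simp [comptage_loop]
  | cons x xs ih =>
      simp only [comptage_loop, beq_iff_eq, Bool.or_eq_true]
      split_ifs with h1 h2 h3 h4 h5 h6
      · subst h1; rw [ih]
        simp only [List.count_cons, List.cons.injEq, List.length_cons, beq_iff_eq, String.reduceEq,
          reduceIte]
        push_cast; and_intros <;> first | omega | trivial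
      · subst h2; rw [ih]
        simp only [List.count_cons, List.cons.injEq, List.length_cons, beq_iff_eq, String.reduceEq,
          reduceIte]
        push_cast; and_intros <;> first | omega | trivial
      · rcases h3 with h3 | h3 <;>
          (subst h3; rw [ih]
           simp only [List.count_cons, List.cons.injEq, List.length_cons, beq_iff_eq, String.reduceEq,
             reduceIte]
           push_cast; and_intros <;> first | omega | trivial)
      · subst h4; rw [ih]
        simp only [List.count_cons, List.cons.injEq, List.length_cons, beq_iff_eq, String.reduceEq,
          reduceIte]
        push_cast; and_intros <;> first | omega | trivial
      · subst h5; rw [ih]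
        simp only [List.count_cons, List.cons.injEq, List.length_cons, beq_iff_eq, String.reduceEq,
          reduceIte]
        push_cast; and_intros <;> first | omega | trivial
      · subst h6; rw [ih]
        simp only [List.count_cons, List.cons.injEq, List.length_cons, beq_iff_eq, String.reduceEq,
          reduceIte]
        push_cast; and_intros <;> first | omega | trivial
      · push_neg at h3
        rw [ih]
        simp only [List.count_cons, List.cons.injEq, List.length_cons, beq_iff_eq,
          if_neg h1, if_neg h2, if_neg h3.1, if_neg h3.2, if_neg h4, if_neg h5, if_neg h6]
        push_cast; and_intros <;> first | omega | trivial

-- ===== VERDICT (by name: the statement is the Claim_ definition above) =====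
theorem comptage_user_agent_spec : Claim_equal_comptage_user_agent := by
  intro l _
  unfold Spec_comptage_user_agent comptage_user_agent comptage_user_agent_alt
  rw [comptage_loop_eq]
  simp [PySem.List.count_eq]
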